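-- pv_equiv track=rewrite | github.com/Arminkhayati/NLUToolikit | best_models/hotel_reservation_task/from_old_code/sentence_from_template.py | check_for_post
-- ===== SOURCE A (Python) =====
-- def check_for_post(slot, sent):
--     new_slot, new_sent = [], []
--     for i in range(len(sent)):
--         new_sl, new_se = slot[i], sent[i]
--         # new_se = str(new_se)
--         if new_sl == "O":
--             for w in new_se.split(" "):
--                 new_slot.append(new_sl)
--                 new_sent.append(w)
--         else:
--             words = new_se.split(" ")
--             new_slot.append(new_sl)
--             new_sent.append(words.pop(0))
--             for w in words:
--                 new_slot.append(new_sl+"_post")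
--                 new_sent.append(w)
--     return new_slot, new_sent
-- ===== SOURCE B (Python) =====
-- def check_for_post(slot, sent):
--     # labels: computed arithmetically from space counts, no splitting
--     labels = []
--     for i in range(len(sent)):
--         lab = slot[i]
--         post = lab if lab == "O" else lab + "_post"
--         labels.extend([lab] + [post] * sent[i].count(" "))
--     # tokens: one global join + split instead of per-item splitting
--     tokens = " ".join(sent).split(" ") if sent else []
--     return labels, tokens
-- ===== Notes on version B (the rewrite author's own statement) =====
-- stated objective: alternative
-- what changed: B never splits per item: labels are computed arithmetically as [lab] plus count(' ') copies of the post label via list repetition, and the token list is produced by one global ' '.join(sent).split(' ') instead of A's per-item split with branching inner append loops.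
import Mathlib
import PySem

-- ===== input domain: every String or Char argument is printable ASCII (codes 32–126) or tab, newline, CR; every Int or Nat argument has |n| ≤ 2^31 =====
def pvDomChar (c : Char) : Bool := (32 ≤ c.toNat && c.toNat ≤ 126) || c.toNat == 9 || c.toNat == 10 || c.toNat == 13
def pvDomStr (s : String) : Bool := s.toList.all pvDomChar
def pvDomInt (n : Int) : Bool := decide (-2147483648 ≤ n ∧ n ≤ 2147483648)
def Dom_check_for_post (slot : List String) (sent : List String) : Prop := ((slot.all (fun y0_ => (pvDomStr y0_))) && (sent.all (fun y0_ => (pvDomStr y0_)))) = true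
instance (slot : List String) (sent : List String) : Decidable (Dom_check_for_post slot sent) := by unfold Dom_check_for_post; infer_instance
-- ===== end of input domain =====

-- B derives the label list arithmetically from space COUNTS (no splitting) and the token list
-- from ONE global join+split, instead of A's per-item split with branching inner append loops
-- (objective: alternative algorithm, same cost).

-- ===== PORT A =====
-- the for-i loop of A with its two accumulators new_slot, new_sent
def cfpLoopA (slot : List String) (sent : List String) : List Int → List String × List String → List String × List String
  | [], st => st
  | i :: rest, st =>
    let new_sl := (PySem.List.pyGet? slot i).getD ""    -- slot[i]; Pre_ excludes the out-of-range IndexError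
    let new_se := (PySem.List.pyGet? sent i).getD ""    -- sent[i]; i < len(sent) always
    let st' :=
      if new_sl == "O" then
        ((PySem.Str.split? new_se " ").getD []).foldl
          (fun st w => (st.1 ++ [new_sl], st.2 ++ [w])) st
      else
        let words := (PySem.Str.split? new_se " ").getD []
        -- words.pop(0): split(" ") never returns an empty list, so pop? is never none
        let p := (PySem.List.pop? words 0).getD ("", [])
        p.2.foldl (fun st w => (st.1 ++ [new_sl ++ "_post"], st.2 ++ [w]))
          (st.1 ++ [new_sl], st.2 ++ [p.1])
    cfpLoopA slot sent rest st'

def check_for_post (slot : List String) (sent : List String) : List String × List String :=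
  cfpLoopA slot sent (PySem.List.pyRange 0 sent.length 1) ([], [])

-- ===== PORT B =====
-- B's labels loop: labels.extend([lab] + [post] * sent[i].count(" "))
def cfpLabelsB (slot : List String) (sent : List String) : List Int → List String → List String
  | [], labels => labels
  | i :: rest, labels =>
    let lab := (PySem.List.pyGet? slot i).getD ""       -- slot[i]; Pre_ excludes the out-of-range IndexError
    let post := if lab == "O" then lab else lab ++ "_post"
    cfpLabelsB slot sent rest
      (labels ++ lab :: List.replicate (PySem.Str.count ((PySem.List.pyGet? sent i).getD "") " ") post)

def check_for_post_alt (slot : List String) (sent : List String) : List String × List String :=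
  let labels := cfpLabelsB slot sent (PySem.List.pyRange 0 sent.length 1) []
  -- tokens = " ".join(sent).split(" ") if sent else []
  let tokens := if sent.isEmpty then [] else (PySem.Str.split? (PySem.Str.join " " sent) " ").getD []
  (labels, tokens)

-- ===== PRECONDITION & SPEC =====
-- Pre_ excludes exactly the inputs where Python A raises IndexError: slot[i] with len(slot) < len(sent)
def Pre_check_for_post (slot : List String) (sent : List String) : Prop := sent.length ≤ slot.length
instance (slot : List String) (sent : List String) : Decidable (Pre_check_for_post slot sent) := by unfold Pre_check_for_post; infer_instance
def pvWitness_check_for_post : List String × List String := (["O", "city"], ["a b", "new york"])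
def Spec_check_for_post (slot : List String) (sent : List String) (out : List String × List String) : Prop := out = check_for_post_alt slot sent
instance (slot : List String) (sent : List String) (out : List String × List String) : Decidable (Spec_check_for_post slot sent out) := by unfold Spec_check_for_post; infer_instance

-- ===== CLAIM (what is proved, stated in full; the proofs are below) =====
def Claim_equal_check_for_post : Prop := ∀ (slot : List String) (sent : List String), Dom_check_for_post slot sent → Pre_check_for_post slot sent → Spec_check_for_post slot sent (check_for_post slot sent)

-- ===== LEMMAS AND PROOFS =====

-- prepend to the first piece (the 'cur' accumulator of splitOn.go, resolved)
def pvPF (p : List Char) : List (List Char) → List (List Char)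
  | [] => [p]
  | x :: xs => (p ++ x) :: xs

-- plain structural recursion computing s.split(" ") on code points
def pvSplitSp : List Char → List (List Char)
  | [] => [[]]
  | c :: rest => if c = ' ' then [] :: pvSplitSp rest else pvPF [c] (pvSplitSp rest)

-- words of one Python string: s.split(" ") as a List String
def pvWordsOf (s : String) : List String := (PySem.Str.split? s " ").getD []

-- per-index label contribution of A's loop body
def pvLabA (slot : List String) (sent : List String) (i : Int) : List String :=
  let lab := (PySem.List.pyGet? slot i).getD ""
  let words := pvWordsOf ((PySem.List.pyGet? sent i).getD "")
  if lab == "O" then List.replicate words.length lab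
  else lab :: List.replicate (words.length - 1) (lab ++ "_post")

-- per-index label contribution of B's loop body
def pvLabB (slot : List String) (sent : List String) (i : Int) : List String :=
  let lab := (PySem.List.pyGet? slot i).getD ""
  let post := if lab == "O" then lab else lab ++ "_post"
  lab :: List.replicate (PySem.Str.count ((PySem.List.pyGet? sent i).getD "") " ") post

theorem pvSplitSp_ne_nil (cs : List Char) : pvSplitSp cs ≠ [] := by
  cases cs with
  | nil => simp [pvSplitSp]
  | cons c rest =>
    simp only [pvSplitSp]
    split
    · simp
    · rcases h : pvSplitSp rest with _ | ⟨x, xs⟩ <;> simp [pvPF]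

theorem pvPF_pvPF (p q : List Char) (x : List (List Char)) :
    pvPF p (pvPF q x) = pvPF (p ++ q) x := by
  cases x <;> simp [pvPF]

theorem pvPF_append (p : List Char) (x y : List (List Char)) (hx : x ≠ []) :
    pvPF p (x ++ y) = pvPF p x ++ y := by
  cases x with
  | nil => exact absurd rfl hx
  | cons a xs => simp [pvPF]

theorem pv_go_eq (fuel : Nat) : ∀ (l cur : List Char) (acc : List (List Char)),
    l.length < fuel →
    PySem.Chars.splitOn.go [' '] fuel l cur acc = acc.reverse ++ pvPF cur.reverse (pvSplitSp l) := by
  induction fuel with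
  | zero => intro l cur acc h; omega
  | succ n ih =>
    intro l cur acc h
    cases l with
    | nil => simp [PySem.Chars.splitOn.go, pvSplitSp, pvPF]
    | cons c rest =>
      simp only [PySem.Chars.splitOn.go]
      by_cases hc : c = ' '
      · have hp : [' '].isPrefixOf (c :: rest) = true := by simp [hc, List.isPrefixOf]
        rw [if_pos hp]
        rw [show List.drop [' '].length (c :: rest) = rest from rfl]
        rw [ih rest [] (cur.reverse :: acc) (by simpa using Nat.lt_of_succ_lt_succ h)]
        rcases hsp : pvSplitSp rest with _ | ⟨x, xs⟩
        · exact absurd hsp (pvSplitSp_ne_nil rest)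
        · simp [pvSplitSp, hc, hsp, pvPF]
      · have hp : [' '].isPrefixOf (c :: rest) = false := by
          simp [List.isPrefixOf]; exact fun h' => hc h'.symm
        rw [if_neg (by simp [hp])]
        have := ih rest (c :: cur) acc (by simpa using Nat.lt_of_succ_lt_succ h)
        rw [this]
        simp [pvSplitSp, hc, pvPF_pvPF]

theorem pv_splitOn_sp (cs : List Char) : PySem.Chars.splitOn cs [' '] = pvSplitSp cs := by
  unfold PySem.Chars.splitOn
  rw [pv_go_eq (cs.length + 1) cs [] [] (by omega)]
  rcases h : pvSplitSp cs with _ | ⟨x, xs⟩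
  · exact absurd h (pvSplitSp_ne_nil cs)
  · simp [pvPF]

theorem pv_wordsOf_eq (s : String) :
    pvWordsOf s = (pvSplitSp s.toList).map String.ofList := by
  simp [pvWordsOf, PySem.Str.split?, PySem.Chars.split?, pv_splitOn_sp,
    show (" " : String).toList = [' '] from rfl]

theorem pv_wordsOf_ne_nil (s : String) : pvWordsOf s ≠ [] := by
  rw [pv_wordsOf_eq]
  simp [pvSplitSp_ne_nil]

theorem pv_count_go (fuel : Nat) : ∀ (l : List Char) (acc : Nat),
    l.length ≤ fuel →
    PySem.Chars.count.go [' '] fuel l acc = acc + l.count ' ' := by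
  induction fuel with
  | zero =>
    intro l acc h
    have : l = [] := List.eq_nil_of_length_eq_zero (Nat.le_zero.mp h)
    simp [this, PySem.Chars.count.go]
  | succ n ih =>
    intro l acc h
    cases l with
    | nil => simp [PySem.Chars.count.go]
    | cons c rest =>
      simp only [PySem.Chars.count.go]
      by_cases hc : c = ' '
      · have hp : [' '].isPrefixOf (c :: rest) = true := by simp [hc, List.isPrefixOf]
        rw [if_pos hp]
        simp only [List.length_cons] at h
        rw [show List.drop [' '].length (c :: rest) = rest by simp]
        rw [ih rest (acc + 1) (by omega)]
        simp [hc]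
        omega
      · have hp : [' '].isPrefixOf (c :: rest) = false := by
          simp [List.isPrefixOf]; exact fun h' => hc h'.symm
        rw [if_neg (by simp [hp])]
        simp only [List.length_cons] at h
        rw [ih rest acc (by omega)]
        simp [hc]

theorem pv_count_space (s : String) : PySem.Str.count s " " = s.toList.count ' ' := by
  rw [PySem.Str.count_eq, show (" " : String).toList = [' '] from rfl]
  unfold PySem.Chars.count
  rw [if_neg (by simp)]
  simpa using pv_count_go s.toList.length s.toList 0 (le_refl _)

theorem pv_length_splitSp (cs : List Char) :
    (pvSplitSp cs).length = cs.count ' ' + 1 := by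
  induction cs with
  | nil => simp [pvSplitSp]
  | cons c rest ih =>
    simp only [pvSplitSp]
    by_cases hc : c = ' '
    · simp [hc, ih]
    · rcases h : pvSplitSp rest with _ | ⟨x, xs⟩
      · exact absurd h (pvSplitSp_ne_nil rest)
      · rw [if_neg hc]
        have := ih
        rw [h] at this
        simp [pvPF, hc, ← this]

-- per-index label contributions of the two loops coincide
theorem pv_labA_eq_labB (slot sent : List String) (i : Int) :
    pvLabA slot sent i = pvLabB slot sent i := by
  unfold pvLabA pvLabB
  have hlen : (pvWordsOf ((PySem.List.pyGet? sent i).getD "")).length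
      = PySem.Str.count ((PySem.List.pyGet? sent i).getD "") " " + 1 := by
    rw [pv_wordsOf_eq, pv_count_space, List.length_map, pv_length_splitSp]
  by_cases hO : ((PySem.List.pyGet? slot i).getD "") == "O"
  · simp only [hO, if_true, hlen, List.replicate_succ]
  · simp only [hO, Bool.false_eq_true, if_false, hlen]
    simp

theorem pv_splitSp_append (a b : List Char) :
    pvSplitSp (a ++ ' ' :: b) = pvSplitSp a ++ pvSplitSp b := by
  induction a with
  | nil => simp [pvSplitSp]
  | cons c rest ih =>
    simp only [List.cons_append, pvSplitSp]
    by_cases hc : c = ' '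
    · simp [hc, ih]
    · rw [if_neg hc, if_neg hc, ih, pvPF_append [c] _ _ (pvSplitSp_ne_nil rest)]

theorem pv_join_sp (sent : List String) (h : sent ≠ []) :
    pvSplitSp ((PySem.Str.join " " sent).toList)
      = sent.flatMap (fun s => pvSplitSp s.toList) := by
  induction sent with
  | nil => exact absurd rfl h
  | cons x tl ih =>
    cases tl with
    | nil =>
      simp [PySem.Str.join, PySem.Chars.join, List.intercalate]
    | cons y tl' =>
      have hj : (PySem.Str.join " " (x :: y :: tl')).toList
          = x.toList ++ ' ' :: (PySem.Str.join " " (y :: tl')).toList := by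
        simp [PySem.Str.join, PySem.Chars.join_cons_cons,
          show (" " : String).toList = [' '] from rfl]
      rw [hj, pv_splitSp_append, ih (by simp)]
      simp

-- folds of A's inner loops, resolved
theorem pv_fold_const (ws : List String) (lab : String) :
    ∀ ns : List String, ws.foldl (fun a _ => a ++ [lab]) ns = ns ++ List.replicate ws.length lab := by
  induction ws with
  | nil => intro ns; simp
  | cons w ws ih =>
    intro ns
    simp only [List.foldl_cons, List.length_cons, ih]
    simp [List.replicate_succ]

theorem pv_fold_id (ws : List String) :
    ∀ ns : List String, ws.foldl (fun a w => a ++ [w]) ns = ns ++ ws := by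
  induction ws with
  | nil => intro ns; simp
  | cons w ws ih => intro ns; simp [ih]

-- A's loop equals flatMaps of the per-index contributions
theorem pv_loopA_eq (slot sent : List String) (idxs : List Int) :
    ∀ ns nt, cfpLoopA slot sent idxs (ns, nt) =
      (ns ++ idxs.flatMap (pvLabA slot sent),
       nt ++ idxs.flatMap (fun i => pvWordsOf ((PySem.List.pyGet? sent i).getD ""))) := by
  induction idxs with
  | nil => intro ns nt; simp [cfpLoopA]
  | cons i rest ih =>
    intro ns nt
    simp only [cfpLoopA]
    obtain ⟨w, ws, hw⟩ : ∃ w ws, pvWordsOf ((PySem.List.pyGet? sent i).getD "") = w :: ws := by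
      rcases h : pvWordsOf ((PySem.List.pyGet? sent i).getD "") with _ | ⟨w, ws⟩
      · exact absurd h (pv_wordsOf_ne_nil _)
      · exact ⟨w, ws, rfl⟩
    have hw' : (PySem.Str.split? ((PySem.List.pyGet? sent i).getD "") " ").getD [] = w :: ws := hw
    by_cases hO : ((PySem.List.pyGet? slot i).getD "") == "O"
    · simp only [hO, if_true]
      rw [hw', PySem.List.foldl_prod_mk (fun a _ => a ++ [(PySem.List.pyGet? slot i).getD ""])
        (fun a e => a ++ [e]), pv_fold_const, pv_fold_id, ih]
      simp [pvLabA, hO, hw]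
    · simp only [hO, Bool.false_eq_true, if_false]
      rw [hw', show PySem.List.pop? (w :: ws) 0 = some (w, ws) by
        simp [PySem.List.pop?, PySem.List.pyIdx?]]
      simp only [Option.getD_some]
      rw [PySem.List.foldl_prod_mk (fun a _ => a ++ [(PySem.List.pyGet? slot i).getD "" ++ "_post"])
        (fun a e => a ++ [e]), pv_fold_const, pv_fold_id, ih]
      simp [pvLabA, hO, hw]

-- B's loop equals the flatMap of its per-index contribution
theorem pv_labelsB_eq (slot sent : List String) (idxs : List Int) :
    ∀ labels, cfpLabelsB slot sent idxs labels = labels ++ idxs.flatMap (pvLabB slot sent) := by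
  induction idxs with
  | nil => intro labels; simp [cfpLabelsB]
  | cons i rest ih =>
    intro labels
    simp only [cfpLabelsB]
    rw [ih]
    simp [pvLabB]

theorem pv_flatMap_range {α : Type} (f : String → List α) (xs : List String) :
    (PySem.List.pyRange 0 (xs.length : Int) 1).flatMap
        (fun i => f ((PySem.List.pyGet? xs i).getD ""))
      = xs.flatMap f := by
  conv_rhs => rw [← PySem.List.map_pyGetD_pyRange_zero' xs ""]
  rw [List.flatMap_map]
  simp [PySem.List.pyGetD]

-- tokens: split of the join equals the concatenation of the splits
theorem pv_tokens_eq (sent : List String) (h : sent ≠ []) :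
    (PySem.Str.split? (PySem.Str.join " " sent) " ").getD [] = sent.flatMap pvWordsOf := by
  have : pvWordsOf (PySem.Str.join " " sent) = sent.flatMap pvWordsOf := by
    rw [pv_wordsOf_eq, pv_join_sp sent h]
    simp only [List.map_flatMap]
    apply List.flatMap_congr
    intro s _
    rw [pv_wordsOf_eq]
  exact this

-- ===== VERDICT (by name: the statement is the Claim_ definition above) =====
theorem check_for_post_spec : Claim_equal_check_for_post := by
  intro slot sent _ _
  unfold Spec_check_for_post check_for_post check_for_post_alt
  rw [pv_loopA_eq, pv_labelsB_eq]
  simp only [List.nil_append]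
  have hlab : pvLabA slot sent = pvLabB slot sent :=
    funext (fun i => pv_labA_eq_labB slot sent i)
  rw [hlab]
  rcases hs : sent with _ | ⟨x, tl⟩
  · simp [PySem.List.pyRange]
  · rw [← hs]
    have hne : sent ≠ [] := by rw [hs]; simp
    rw [pv_flatMap_range pvWordsOf sent, if_neg (by simp [hs]), pv_tokens_eq sent hne]
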